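-- pv_equiv track=rewrite | github.com/olelenz/connect_four | agents/agent_minimax/minimax_not_good.py | number_of_connected_n
-- ===== SOURCE A (Python) =====
-- def number_of_connected_n(board: int, connected: int) -> int:
--     """
--     Evaluates the number of connected-n in a bitboard.
--
--     Parameters
--     ----------
--     board: int
--         The bitboard to be evaluated.
--
--     connected: int
--         The number of connected pieces to check for.
--
--     Returns
--     -------
--     :int
--         Number of connected-n.
--
--     """
--     assert connected > 0
--     out: int = 0
--     for i in [1, 6, 7, 8]:
--         temp_board = board
--         for _ in range(connected - 1):
--             temp_board = temp_board & (temp_board >> i)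
--         out += bin(temp_board).count('1')
--     return out
-- ===== SOURCE B (Python) =====
-- def number_of_connected_n(board: int, connected: int) -> int:
--     """Count connected-n runs in a bitboard, per direction shift 1,6,7,8.
--
--     Doubling re-implementation: run(c) = AND of board >> (k*i) for k in
--     0..c-1 is built by halving c (O(log connected) AND/shift steps per
--     direction instead of O(connected)).
--     """
--     assert connected > 0
--
--     def run(i: int, c: int) -> int:
--         if c <= 1:
--             return board
--         h = run(i, c // 2)
--         t = h & (h >> ((c // 2) * i))
--         if c % 2 == 1:
--             t &= board >> ((c - 1) * i)
--         return t
--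
--     return sum(bin(run(i, connected)).count('1') for i in (1, 6, 7, 8))
-- ===== Notes on version B (the rewrite author's own statement) =====
-- stated objective: faster
-- what changed: A lengthens each directional run mask one step per iteration (connected-1 AND/shift steps per direction); B builds the same run mask by doubling (halving `connected`, combining half-length masks), using O(log connected) AND/shift steps per direction.
import Mathlib
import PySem

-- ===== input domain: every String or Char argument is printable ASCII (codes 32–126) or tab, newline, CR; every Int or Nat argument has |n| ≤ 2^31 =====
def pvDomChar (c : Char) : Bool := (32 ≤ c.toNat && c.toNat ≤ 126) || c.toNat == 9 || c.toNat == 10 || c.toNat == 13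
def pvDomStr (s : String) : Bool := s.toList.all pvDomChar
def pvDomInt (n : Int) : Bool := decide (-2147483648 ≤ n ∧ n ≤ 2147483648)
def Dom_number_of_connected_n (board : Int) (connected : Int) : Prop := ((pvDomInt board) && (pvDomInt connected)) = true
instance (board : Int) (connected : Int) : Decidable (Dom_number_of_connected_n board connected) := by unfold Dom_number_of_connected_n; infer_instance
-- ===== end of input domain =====

-- B replaces A's one-AND-per-step run-mask construction by doubling (halving `connected`),
-- an asymptotically smaller number of AND/shift steps per direction; equal return value is
-- proved for connected ≥ 1 (A's `assert` raises otherwise).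

-- ===== PORT A =====
-- `for _ in range(connected - 1): temp_board = temp_board & (temp_board >> i)`;
-- (connected - 1).toNat iterations is exact under Pre_ (connected ≥ 1; Python raises otherwise).
-- `&` is PySem.Int.band (Python-exact on negatives), `>> i` is Int.shiftRight (i ∈ {1,6,7,8} ≥ 0).
def pyAInner (i : Nat) (t : Int) : Nat → Int
  | 0 => t
  | n + 1 => pyAInner i (PySem.Int.band t (Int.shiftRight t i)) n

-- `bin(t).count('1')` equals `t.bit_count()` for every Python int = PySem.Int.bitCount.
def number_of_connected_n (board : Int) (connected : Int) : Int :=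
  [1, 6, 7, 8].foldl
    (fun out i => out + (PySem.Int.bitCount (pyAInner i board (connected - 1).toNat) : Int)) 0

-- ===== PORT B =====
-- Source B's `run(i, c)`: doubling construction of AND_{k<c} (board >> (k*i)).
def pyBRun (board : Int) (i : Nat) : Nat → Int
  | 0 => board
  | 1 => board
  | c + 2 =>
      let m := (c + 2) / 2
      let h := pyBRun board i m
      let t := PySem.Int.band h (Int.shiftRight h (m * i))
      if (c + 2) % 2 = 1 then PySem.Int.band t (Int.shiftRight board ((c + 1) * i)) else t
  decreasing_by omega

-- `sum(bin(run(i, connected)).count('1') for i in (1, 6, 7, 8))`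
def number_of_connected_n_alt (board : Int) (connected : Int) : Int :=
  (([1, 6, 7, 8] : List Nat).map
    (fun i => (PySem.Int.bitCount (pyBRun board i connected.toNat) : Int))).sum

-- ===== PRECONDITION & SPEC =====
-- A's `assert connected > 0` raises AssertionError for connected ≤ 0; exactly those inputs are excluded.
def Pre_number_of_connected_n (board : Int) (connected : Int) : Prop := 1 ≤ connected
instance (board : Int) (connected : Int) : Decidable (Pre_number_of_connected_n board connected) := by
  unfold Pre_number_of_connected_n; infer_instance

def pvWitness_number_of_connected_n : Int × Int := (59, 3)

def Spec_number_of_connected_n (board : Int) (connected : Int) (out : Int) : Prop :=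
  out = number_of_connected_n_alt board connected
instance (board : Int) (connected : Int) (out : Int) : Decidable (Spec_number_of_connected_n board connected out) := by
  unfold Spec_number_of_connected_n; infer_instance

-- ===== CLAIM (what is proved, stated in full; the proofs are below) =====
def Claim_equal_number_of_connected_n : Prop :=
  ∀ (board : Int) (connected : Int), Dom_number_of_connected_n board connected →
    Pre_number_of_connected_n board connected →
    Spec_number_of_connected_n board connected (number_of_connected_n board connected)

-- ===== LEMMAS AND PROOFS =====

-- m - (m &&& n) clears from m exactly the bits shared with n: it is Nat.ldiff m n.
theorem pv_sub_land_eq_ldiff (m : Nat) : ∀ n : Nat, m - (m &&& n) = Nat.ldiff m n := by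
  induction m using Nat.binaryRec with
  | zero =>
    intro n
    apply Nat.eq_of_testBit_eq
    intro k
    simp [Nat.testBit_ldiff]
  | bit a m ih =>
    intro n
    induction n using Nat.bitCasesOn with
    | bit b n =>
      rw [Nat.land_bit, Nat.ldiff_bit, ← ih n]
      have h1 : m &&& n ≤ m := Nat.and_le_left
      simp only [Nat.bit_val]
      cases a <;> cases b <;> simp <;> omega

-- PySem's Python-exact `&` coincides with Mathlib's Int.land.
theorem pv_band_eq_land (a b : Int) : PySem.Int.band a b = Int.land a b := by
  cases a with
  | ofNat m =>
    cases b with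
    | ofNat n => simp [PySem.Int.band, Int.land]
    | negSucc n => simp [PySem.Int.band, Int.land, Int.negSucc_not_nonneg, pv_sub_land_eq_ldiff]
  | negSucc m =>
    cases b with
    | ofNat n => simp [PySem.Int.band, Int.land, Int.negSucc_not_nonneg, pv_sub_land_eq_ldiff]
    | negSucc n =>
      simp only [PySem.Int.band, Int.land, Int.negSucc_not_nonneg, if_false]
      simp [Int.negSucc_eq]
      ring

theorem pv_testBit_band (a b : Int) (k : Nat) :
    (PySem.Int.band a b).testBit k = (a.testBit k && b.testBit k) := by
  rw [pv_band_eq_land]; exact Int.testBit_land a b k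

theorem pv_testBit_shiftRight (a : Int) (s k : Nat) :
    (Int.shiftRight a s).testBit k = a.testBit (s + k) := by
  cases a with
  | ofNat m =>
    show (Int.ofNat (m >>> s)).testBit k = _
    simp [Int.testBit, Nat.testBit_shiftRight]
  | negSucc m =>
    show (Int.negSucc (m >>> s)).testBit k = _
    simp [Int.testBit, Nat.testBit_shiftRight]

theorem pv_int_eq_of_testBit_eq (a b : Int) (h : ∀ k, a.testBit k = b.testBit k) : a = b := by
  cases a with
  | ofNat m =>
    cases b with
    | ofNat n => exact congrArg Int.ofNat (Nat.eq_of_testBit_eq (fun k => by simpa [Int.testBit] using h k))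
    | negSucc n =>
      exfalso
      have hk := h (max m n)
      have h1 : m < 2 ^ (max m n) := lt_of_le_of_lt (le_max_left m n) Nat.lt_two_pow_self
      have h2 : n < 2 ^ (max m n) := lt_of_le_of_lt (le_max_right m n) Nat.lt_two_pow_self
      simp [Int.testBit, Nat.testBit_lt_two_pow h1, Nat.testBit_lt_two_pow h2] at hk
  | negSucc m =>
    cases b with
    | ofNat n =>
      exfalso
      have hk := h (max m n)
      have h1 : m < 2 ^ (max m n) := lt_of_le_of_lt (le_max_left m n) Nat.lt_two_pow_self
      have h2 : n < 2 ^ (max m n) := lt_of_le_of_lt (le_max_right m n) Nat.lt_two_pow_self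
      simp [Int.testBit, Nat.testBit_lt_two_pow h1, Nat.testBit_lt_two_pow h2] at hk
    | negSucc n =>
      exact congrArg Int.negSucc (Nat.eq_of_testBit_eq (fun k => by
        have hk := h k; simpa [Int.testBit] using hk))

-- Both programs build the same value: andUpTo b i n = AND_{k ≤ n} (b >> (k*i)).
def andUpTo (b : Int) (i : Nat) : Nat → Int
  | 0 => b
  | n + 1 => PySem.Int.band (andUpTo b i n) (Int.shiftRight b ((n + 1) * i))

theorem andUpTo_testBit (b : Int) (i : Nat) (n j : Nat) :
    (andUpTo b i n).testBit j = true ↔ ∀ k ≤ n, b.testBit (j + k * i) = true := by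
  induction n with
  | zero =>
    simp only [andUpTo]
    constructor
    · intro h k hk
      have : k = 0 := Nat.le_zero.mp hk
      subst this; simpa using h
    · intro h; simpa using h 0 (le_refl 0)
  | succ n ih =>
    simp only [andUpTo, pv_testBit_band, pv_testBit_shiftRight, Bool.and_eq_true, ih]
    constructor
    · rintro ⟨h1, h2⟩ k hk
      rcases Nat.lt_or_ge k (n + 1) with hlt | hge
      · exact h1 k (by omega)
      · have : k = n + 1 := by omega
        subst this
        rw [show j + (n + 1) * i = (n + 1) * i + j by ring]
        exact h2
    · intro h
      refine ⟨fun k hk => h k (by omega), ?_⟩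
      rw [show (n + 1) * i + j = j + (n + 1) * i by ring]
      exact h (n + 1) (le_refl _)

-- Merging two overlapping run masks (the single fact both loop shapes reduce to).
theorem andUpTo_merge (b : Int) (i : Nat) (n m s : Nat) (h1 : s ≤ n + 1) (h2 : n ≤ m + s) :
    PySem.Int.band (andUpTo b i n) (Int.shiftRight (andUpTo b i m) (s * i)) =
      andUpTo b i (m + s) := by
  apply pv_int_eq_of_testBit_eq
  intro j
  rw [pv_testBit_band, pv_testBit_shiftRight]
  rw [Bool.eq_iff_iff]
  simp only [Bool.and_eq_true, andUpTo_testBit]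
  constructor
  · rintro ⟨ha, hb⟩ k hk
    rcases Nat.lt_or_ge k s with hlt | hge
    · exact ha k (by omega)
    · have hmul : s * i ≤ k * i := Nat.mul_le_mul_right i hge
      have := hb (k - s) (by omega)
      rw [show s * i + j + (k - s) * i = j + k * i by rw [Nat.sub_mul]; omega] at this
      exact this
  · intro h
    refine ⟨fun k hk => h k (by omega), fun k hk => ?_⟩
    have := h (k + s) (by omega)
    rw [show j + (k + s) * i = s * i + j + k * i by rw [Nat.add_mul]; ring] at this
    exact this

theorem pyAInner_eq (i : Nat) (b : Int) :
    ∀ n j, pyAInner i (andUpTo b i j) n = andUpTo b i (j + n) := by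
  intro n
  induction n with
  | zero => intro j; simp [pyAInner]
  | succ n ih =>
    intro j
    have hstep : PySem.Int.band (andUpTo b i j) (Int.shiftRight (andUpTo b i j) i) =
        andUpTo b i (j + 1) := by
      have := andUpTo_merge b i j j 1 (by omega) (by omega)
      rwa [one_mul] at this
    show pyAInner i (PySem.Int.band (andUpTo b i j) (Int.shiftRight (andUpTo b i j) i)) n = _
    rw [hstep, ih (j + 1)]
    congr 1
    omega

theorem pyBRun_eq (b : Int) (i : Nat) : ∀ c, 1 ≤ c → pyBRun b i c = andUpTo b i (c - 1) := by
  intro c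
  induction c using Nat.strong_induction_on with
  | _ c ih =>
    match c with
    | 0 => intro h; exact absurd h (by omega)
    | 1 => intro _; simp [pyBRun, andUpTo]
    | c + 2 =>
      intro _
      have hm : 1 ≤ (c + 2) / 2 := by omega
      have hrec := ih ((c + 2) / 2) (by omega) hm
      rw [pyBRun, hrec]
      set m := (c + 2) / 2 with hm2
      have ht : PySem.Int.band (andUpTo b i (m - 1)) (Int.shiftRight (andUpTo b i (m - 1)) (m * i)) =
          andUpTo b i (m - 1 + m) := andUpTo_merge b i (m - 1) (m - 1) m (by omega) (by omega)
      rw [ht]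
      by_cases hodd : (c + 2) % 2 = 1
      · rw [if_pos hodd]
        have h2 : PySem.Int.band (andUpTo b i (m - 1 + m)) (Int.shiftRight (andUpTo b i 0) ((c + 1) * i)) =
            andUpTo b i (0 + (c + 1)) := andUpTo_merge b i (m - 1 + m) 0 (c + 1) (by omega) (by omega)
        rw [show Int.shiftRight b ((c + 1) * i) = Int.shiftRight (andUpTo b i 0) ((c + 1) * i) from rfl, h2]
        congr 1
        omega
      · rw [if_neg hodd]
        congr 1
        omega

-- ===== VERDICT (by name: the statement is the Claim_ definition above) =====
theorem number_of_connected_n_spec : Claim_equal_number_of_connected_n := by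
  intro board connected _ hpre
  have h : (1 : Int) ≤ connected := hpre
  show number_of_connected_n board connected = number_of_connected_n_alt board connected
  have key : ∀ i : Nat, pyAInner i board (connected.toNat - 1) = pyBRun board i connected.toNat := by
    intro i
    have h1 := pyAInner_eq i board (connected.toNat - 1) 0
    have h2 := pyBRun_eq board i connected.toNat (by omega)
    rw [show andUpTo board i 0 = board from rfl] at h1
    rw [h1, h2]
    congr 1
    omega
  simp [number_of_connected_n, number_of_connected_n_alt, key]
  ring
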